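-- pv_equiv track=rewrite | github.com/Nacho-Cola/coding-test | 프로그래머스/3/77886. 110 옮기기/110 옮기기.py | solution
-- ===== SOURCE A (Python) =====
-- def solution(s):
--
--     answer = []
--     for st in s:
--         stack = ''
--         stack += st[:2]
--         count_110 = 0
--         for ch in st[2:] :
--             stack += ch
--             if stack[-3:] == '110':
--                 stack = stack[:-3]
--                 count_110+=1
--
--         idx = stack.find("111")
--         if idx == -1:
--             idx = stack.rfind('0')
--             stack = stack[:idx+1]+"110"*count_110+stack[idx+1:]
--         else:
--             stack = stack[:idx]+"110"*count_110+stack[idx:]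
--         answer.append(stack)
--
--
--     return answer
-- ===== SOURCE B (Python) =====
-- def solution(s):
--     answer = []
--     for st in s:
--         segs = []   # finished segments, each '1'*j + c with c != '1'
--         k = 0       # length of the current trailing run of '1's
--         cnt = 0     # number of cancelled "110" groups
--         for ch in st:
--             if ch == '1':
--                 k += 1
--             elif ch == '0' and k >= 2:
--                 k -= 2
--                 cnt += 1
--             else:
--                 segs.append('1' * k + ch)
--                 k = 0
--         res = ''.join(segs) + '1' * k
--         i = res.find('111')
--         pos = i if i != -1 else res.rfind('0') + 1
--         answer.append(res[:pos] + '110' * cnt + res[pos:])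
--     return answer
-- ===== Notes on version B (the rewrite author's own statement) =====
-- stated objective: alternative
-- what changed: B never materialises A's character stack: it keeps a run-length counter of the trailing '1'-run plus a list of finished segments, cancels each '110' by an O(1) counter decrement (k -= 2) instead of A's last-three slice compare and stack re-slice, and assembles the residue once at the end as segments + '1'*k before a single merged reinsertion splice.
import Mathlib
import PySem

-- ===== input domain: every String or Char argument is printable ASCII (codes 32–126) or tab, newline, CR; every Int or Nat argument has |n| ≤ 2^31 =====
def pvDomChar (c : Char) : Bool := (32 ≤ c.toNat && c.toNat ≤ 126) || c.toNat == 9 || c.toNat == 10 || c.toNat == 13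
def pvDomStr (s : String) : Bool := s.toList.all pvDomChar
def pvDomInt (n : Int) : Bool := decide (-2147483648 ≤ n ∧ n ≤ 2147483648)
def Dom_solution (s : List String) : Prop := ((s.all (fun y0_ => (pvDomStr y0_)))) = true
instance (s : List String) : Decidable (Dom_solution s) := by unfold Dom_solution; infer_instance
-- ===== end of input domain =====

-- B replaces A's character stack (append / last-three slice compare / slice-off) by a run-length counter of trailing '1's with O(1) cancellation plus finished segments; objective: alternative algorithm, same measured cost.


-- "110" * n (Python string repetition; the count is never negative in either program)
def pvRep110 (n : Int) : List Char := List.flatten (List.replicate n.toNat ['1', '1', '0'])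

-- '1' * k
def pvOnes (k : Int) : List Char := List.replicate k.toNat '1'

-- ===== PORT A =====
-- stack += ch; if stack[-3:] == '110': stack = stack[:-3]; count_110 += 1
def pvAstep (acc : List Char × Int) (ch : Char) : List Char × Int :=
  let st := acc.1 ++ [ch]
  if PySem.List.slice st (some (-3)) none = ['1', '1', '0'] then
    (PySem.List.slice st none (some (-3)), acc.2 + 1)
  else (st, acc.2)

-- the body of A's outer loop, for one string
def pvAone (str : String) : String :=
  let cs := str.toList
  let p := (PySem.List.slice cs (some 2) none).foldl pvAstep (PySem.List.slice cs none (some 2), 0)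
  let stack := p.1
  let idx := PySem.Chars.find stack ['1', '1', '1']
  if idx = -1 then
    let idx2 := PySem.Chars.rfind stack ['0']
    String.ofList (PySem.List.slice stack none (some (idx2 + 1)) ++ pvRep110 p.2
               ++ PySem.List.slice stack (some (idx2 + 1)) none)
  else
    String.ofList (PySem.List.slice stack none (some idx) ++ pvRep110 p.2
               ++ PySem.List.slice stack (some idx) none)

def solution (s : List String) : List String :=
  s.foldl (fun answer st => answer ++ [pvAone st]) []

-- ===== PORT B =====
-- state (segments-as-chars, k = trailing-'1' run length, cnt); ''.join(segs) is kept flattened as a List Char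
def pvBstep (acc : List Char × Int × Int) (ch : Char) : List Char × Int × Int :=
  if ch = '1' then (acc.1, acc.2.1 + 1, acc.2.2)
  else if ch = '0' ∧ 2 ≤ acc.2.1 then (acc.1, acc.2.1 - 2, acc.2.2 + 1)
  else (acc.1 ++ pvOnes acc.2.1 ++ [ch], 0, acc.2.2)

-- the body of B's loop: res = ''.join(segs) + '1'*k; pos = i if i != -1 else rfind+1; one splice
def pvBone (str : String) : String :=
  let r := str.toList.foldl pvBstep ([], 0, 0)
  let res := r.1 ++ pvOnes r.2.1
  let i := PySem.Chars.find res ['1', '1', '1']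
  let pos := if i ≠ -1 then i else PySem.Chars.rfind res ['0'] + 1
  String.ofList (PySem.List.slice res none (some pos) ++ pvRep110 r.2.2
             ++ PySem.List.slice res (some pos) none)

def solution_alt (s : List String) : List String := s.map pvBone

-- ===== PRECONDITION & SPEC =====
def Spec_solution (s : List String) (out : List String) : Prop := out = solution_alt s
instance (s : List String) (out : List String) : Decidable (Spec_solution s out) := by unfold Spec_solution; infer_instance

-- ===== CLAIM (what is proved, stated in full; the proofs are below) =====
def Claim_equal_solution : Prop := ∀ (s : List String), Dom_solution s → Spec_solution s (solution s)

-- ===== LEMMAS AND PROOFS =====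

-- the segment part of B's state never ends in '1' (a flush always appends a non-'1' char)
def pvLastNot1 (w : List Char) : Prop := w = [] ∨ ∃ t c, w = t ++ [c] ∧ c ≠ '1'

theorem pvSuffix3_drop (t : List Char) (a b c : Char) :
    (t ++ [a, b, c]).drop ((t ++ [a, b, c]).length - 3) = [a, b, c] := by
  simp

theorem pvSuffix3_take (t : List Char) (a b c : Char) :
    (t ++ [a, b, c]).take ((t ++ [a, b, c]).length - 3) = t := by
  simp

theorem pvOnes_split (k : Int) (hk : 2 ≤ k) : pvOnes k = pvOnes (k - 2) ++ ['1', '1'] := by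
  unfold pvOnes
  have h : k.toNat = (k - 2).toNat + 2 := by omega
  rw [h, List.replicate_add]
  rfl

-- A's pop test on the view w ++ '1'*k ++ [ch]: it fires exactly when ch = '0' and k ≥ 2
theorem pvPop_iff {w : List Char} (hw : pvLastNot1 w) (k : Int) (hk : 0 ≤ k) (ch : Char) :
    (PySem.List.slice (w ++ pvOnes k ++ [ch]) (some (-3)) none = ['1', '1', '0']
      ↔ (ch = '0' ∧ 2 ≤ k)) := by
  rw [PySem.List.slice_from_neg_ofNat _ 3 (by omega)]
  constructor
  · intro hdrop
    obtain ⟨X, hs⟩ : ∃ X, w ++ pvOnes k ++ [ch] = X ++ ['1', '1', '0'] := by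
      refine ⟨(w ++ pvOnes k ++ [ch]).take ((w ++ pvOnes k ++ [ch]).length - 3), ?_⟩
      conv_lhs => rw [← List.take_append_drop ((w ++ pvOnes k ++ [ch]).length - 3) (w ++ pvOnes k ++ [ch])]
      rw [hdrop]
    have hch0 : ch = '0' := by
      have h1 : ((w ++ pvOnes k) ++ [ch]).getLast? = some ch := List.getLast?_concat
      have h2 : (X ++ ['1', '1', '0']).getLast? = some '0' := by
        rw [show X ++ ['1','1','0'] = (X ++ ['1','1']) ++ ['0'] by simp]
        exact List.getLast?_concat
      rw [hs] at h1
      have h3 := h2.symm.trans h1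
      injection h3 with h3'
      exact h3'.symm
    refine ⟨hch0, ?_⟩
    by_contra hk2
    have hk01 : k = 0 ∨ k = 1 := by omega
    have hcancel : w ++ pvOnes k = X ++ ['1', '1'] := by
      have : (w ++ pvOnes k) ++ [ch] = (X ++ ['1', '1']) ++ ['0'] := by
        rw [List.append_assoc w (pvOnes k) [ch]] at hs ⊢
        rw [hs]; simp
      rw [hch0] at this
      exact List.append_cancel_right this
    rcases hw with rfl | ⟨t, c, rfl, hc1⟩
    · -- empty segment part: '1'*k is too short to end in "11"
      have := congrArg List.length hcancel
      simp [pvOnes] at this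
      omega
    · -- segment part ends in c ≠ '1', yet "11" would force it to be '1'
      obtain ⟨Y, hY⟩ : ∃ Y, t ++ [c] = Y ++ ['1'] := by
        rcases hk01 with h0 | h1
        · refine ⟨X ++ ['1'], ?_⟩
          have := hcancel
          simp only [pvOnes, h0] at this
          simpa using this
        · refine ⟨X, ?_⟩
          have h' : (t ++ [c]) ++ ['1'] = (X ++ ['1']) ++ ['1'] := by
            simpa [pvOnes, h1] using hcancel
          exact List.append_cancel_right h'
      have hc : c = '1' := by
        have h1 : (t ++ [c]).getLast? = some c := List.getLast?_concat
        have h2 : (Y ++ ['1']).getLast? = some '1' := List.getLast?_concat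
        rw [hY] at h1
        have h3 := h2.symm.trans h1
        injection h3 with h3'
        exact h3'.symm
      exact hc1 hc
  · rintro ⟨hch0, hk2⟩
    rw [hch0, pvOnes_split k hk2]
    rw [show w ++ (pvOnes (k-2) ++ ['1','1']) ++ ['0'] = (w ++ pvOnes (k-2)) ++ ['1','1','0'] by simp]
    exact pvSuffix3_drop _ _ _ _

-- simulation: B's state views onto A's stack, step by step
theorem pvSim (cs : List Char) :
    ∀ (w : List Char) (k cnt : Int), pvLastNot1 w → 0 ≤ k →
      cs.foldl pvAstep (w ++ pvOnes k, cnt)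
        = ((cs.foldl pvBstep (w, k, cnt)).1 ++ pvOnes (cs.foldl pvBstep (w, k, cnt)).2.1,
           (cs.foldl pvBstep (w, k, cnt)).2.2)
      ∧ pvLastNot1 (cs.foldl pvBstep (w, k, cnt)).1
      ∧ 0 ≤ (cs.foldl pvBstep (w, k, cnt)).2.1 := by
  induction cs with
  | nil => intro w k cnt hw hk; exact ⟨rfl, hw, hk⟩
  | cons ch cs ih =>
    intro w k cnt hw hk
    by_cases hch1 : ch = '1'
    · have hA : pvAstep (w ++ pvOnes k, cnt) ch = (w ++ pvOnes (k + 1), cnt) := by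
        unfold pvAstep
        rw [if_neg (by rw [pvPop_iff hw k hk ch]; rw [hch1]; exact fun h => by simp at h)]
        dsimp only
        rw [show (w ++ pvOnes k) ++ [ch] = w ++ pvOnes (k + 1) by
          rw [hch1, List.append_assoc]
          unfold pvOnes
          rw [show (k + 1).toNat = k.toNat + 1 by omega, List.replicate_succ']]
      have hB : pvBstep (w, k, cnt) ch = (w, k + 1, cnt) := by
        unfold pvBstep
        rw [if_pos hch1]
      rw [List.foldl_cons, List.foldl_cons, hA, hB]
      exact ih w (k + 1) cnt hw (by omega)
    · by_cases hpop : ch = '0' ∧ 2 ≤ k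
      · have hA : pvAstep (w ++ pvOnes k, cnt) ch = (w ++ pvOnes (k - 2), cnt + 1) := by
          unfold pvAstep
          rw [if_pos ((pvPop_iff hw k hk ch).mpr hpop)]
          dsimp only
          rw [PySem.List.slice_to_neg_ofNat _ 3 (by omega)]
          rw [show w ++ pvOnes k ++ [ch]
              = (w ++ pvOnes (k - 2)) ++ ['1', '1', '0'] by
            rw [pvOnes_split k hpop.2, hpop.1]; simp]
          rw [pvSuffix3_take]
        have hB : pvBstep (w, k, cnt) ch = (w, k - 2, cnt + 1) := by
          unfold pvBstep
          rw [if_neg hch1, if_pos hpop]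
        rw [List.foldl_cons, List.foldl_cons, hA, hB]
        exact ih w (k - 2) (cnt + 1) hw (by omega)
      · have hA : pvAstep (w ++ pvOnes k, cnt) ch = (w ++ pvOnes k ++ [ch], cnt) := by
          unfold pvAstep
          rw [if_neg (by rw [pvPop_iff hw k hk ch]; exact hpop)]
        have hB : pvBstep (w, k, cnt) ch = (w ++ pvOnes k ++ [ch], 0, cnt) := by
          unfold pvBstep
          rw [if_neg hch1, if_neg hpop]
        have hw' : pvLastNot1 (w ++ pvOnes k ++ [ch]) :=
          Or.inr ⟨w ++ pvOnes k, ch, rfl, hch1⟩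
        rw [List.foldl_cons, List.foldl_cons, hA, hB]
        have := ih (w ++ pvOnes k ++ [ch]) 0 cnt hw' (by omega)
        simpa [pvOnes] using this

-- A's first two unchecked pushes are harmless
theorem pvAstep_short (l : List Char) (hl : l.length ≤ 1) (cnt : Int) (ch : Char) :
    pvAstep (l, cnt) ch = (l ++ [ch], cnt) := by
  unfold pvAstep
  rw [if_neg]
  intro h
  rw [PySem.List.slice_from_neg_ofNat _ 3 (by omega)] at h
  have := congrArg List.length h
  simp at this
  omega

theorem pvAinit (cs : List Char) :
    (PySem.List.slice cs (some 2) none).foldl pvAstep (PySem.List.slice cs none (some 2), 0)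
      = cs.foldl pvAstep ([], 0) := by
  rw [PySem.List.slice_from _ (by norm_num), PySem.List.slice_to _ (by norm_num)]
  rw [show (2 : Int).toNat = 2 from rfl]
  conv_rhs => rw [← List.take_append_drop 2 cs, List.foldl_append]
  congr 1
  rcases cs with _ | ⟨a, _ | ⟨b, tl⟩⟩
  · rfl
  · simp [pvAstep_short [] (by simp) 0 a]
  · show (List.take 2 (a :: b :: tl), 0) = List.foldl pvAstep ([], 0) (List.take 2 (a :: b :: tl))
    rw [show List.take 2 (a :: b :: tl) = [a, b] from rfl]
    rw [List.foldl_cons, pvAstep_short [] (by simp) 0 a, List.nil_append,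
        List.foldl_cons, pvAstep_short [a] (by simp) 0 b]
    rfl

theorem pvOne_agree (str : String) : pvAone str = pvBone str := by
  unfold pvAone pvBone
  dsimp only
  rw [pvAinit]
  obtain ⟨hview, -, -⟩ := pvSim str.toList [] 0 0 (Or.inl rfl) (by omega)
  simp only [show ([] ++ pvOnes 0 : List Char) = ([] : List Char) from rfl] at hview
  rw [hview]
  set r := str.toList.foldl pvBstep ([], 0, 0) with hr
  set res := r.1 ++ pvOnes r.2.1 with hres
  by_cases h : PySem.Chars.find res ['1', '1', '1'] = -1
  · rw [if_pos h, if_neg (by simpa using h)]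
  · rw [if_neg h, if_pos h]

theorem solution_eq_alt (s : List String) : solution s = solution_alt s := by
  unfold solution solution_alt
  rw [PySem.List.foldl_append_singleton_eq_map]
  exact List.map_congr_left fun x _ => pvOne_agree x

-- ===== VERDICT (by name: the statement is the Claim_ definition above) =====
theorem solution_spec : Claim_equal_solution := by
  intro s _
  unfold Spec_solution
  exact solution_eq_alt s
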